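-- pv_equiv track=rewrite | github.com/car13mesquita/first_semester_solutions | Cycle 8/hw8-2-5.py | sum_to_odd
-- ===== SOURCE A (Python) =====
-- def sum_to_odd(lst):
--     total = 0
--     for num in lst:
--         if num % 2 == 0:
--             total += num
--         else:
--             return(total)
--     return(total)
-- ===== SOURCE B (Python) =====
-- def sum_to_odd(lst):
--     cut = next((i for i, n in enumerate(lst) if n % 2 != 0), len(lst))
--     return sum(lst[:cut])
-- ===== Notes on version B (the rewrite author's own statement) =====
-- stated objective: alternative
-- what changed: Replaces the single accumulating loop with early return by two staged passes: first find the index of the first odd element (defaulting to len), then sum the slice up to that index.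
import Mathlib
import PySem

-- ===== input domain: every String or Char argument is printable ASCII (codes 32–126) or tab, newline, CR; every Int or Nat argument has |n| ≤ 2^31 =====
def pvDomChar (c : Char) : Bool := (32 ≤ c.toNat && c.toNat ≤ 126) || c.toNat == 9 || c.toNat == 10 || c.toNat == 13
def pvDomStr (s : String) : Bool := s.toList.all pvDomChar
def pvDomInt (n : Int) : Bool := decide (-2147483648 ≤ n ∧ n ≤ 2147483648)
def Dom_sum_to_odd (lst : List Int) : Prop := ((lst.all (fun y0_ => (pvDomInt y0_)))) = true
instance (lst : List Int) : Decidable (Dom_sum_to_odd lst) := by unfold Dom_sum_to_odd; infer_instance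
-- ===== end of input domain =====

-- B replaces A's accumulating loop with early return by two staged passes: find the first odd index, then sum the slice up to it (alternative decomposition; same cost).


-- ===== PORT A =====
-- Literal port of A: loop with running total, early return at the first odd element.
def sum_to_odd_go (total : Int) : List Int → Int
  | [] => total
  | num :: rest => if num % 2 == 0 then sum_to_odd_go (total + num) rest else total

def sum_to_odd (lst : List Int) : Int := sum_to_odd_go 0 lst

-- ===== PORT B =====
-- Pass 1 of B: index of the first odd element, defaulting to the length (next(..., len(lst))).
def firstOddIdx : List Int → Nat
  | [] => 0
  | n :: rest => if n % 2 != 0 then 0 else firstOddIdx rest + 1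

-- Port of B: lst[:cut] with 0 ≤ cut is List.take cut, then sum that slice.
def sum_to_odd_alt (lst : List Int) : Int := (lst.take (firstOddIdx lst)).sum

-- ===== PRECONDITION & SPEC =====
def Spec_sum_to_odd (lst : List Int) (out : Int) : Prop := out = sum_to_odd_alt lst
instance (lst : List Int) (out : Int) : Decidable (Spec_sum_to_odd lst out) := by unfold Spec_sum_to_odd; infer_instance

-- ===== CLAIM (what is proved, stated in full; the proofs are below) =====
def Claim_equal_sum_to_odd : Prop := ∀ (lst : List Int), Dom_sum_to_odd lst → Spec_sum_to_odd lst (sum_to_odd lst)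

-- ===== LEMMAS AND PROOFS =====
theorem sum_to_odd_go_eq (l : List Int) (total : Int) :
    sum_to_odd_go total l = total + (l.take (firstOddIdx l)).sum := by
  induction l generalizing total with
  | nil => simp [sum_to_odd_go, firstOddIdx]
  | cons n rest ih =>
    simp only [sum_to_odd_go, firstOddIdx]
    by_cases h : (n % 2 == 0) = true
    · have h' : (n % 2 != 0) = false := by simp_all [bne]
      simp [h, h', ih, add_assoc]
    · have h' : (n % 2 != 0) = true := by simp_all [bne]
      simp [h, h']

-- ===== VERDICT (by name: the statement is the Claim_ definition above) =====
theorem sum_to_odd_spec : Claim_equal_sum_to_odd := by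
  intro lst _
  unfold Spec_sum_to_odd sum_to_odd sum_to_odd_alt
  simp [sum_to_odd_go_eq]
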